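-- pv_equiv track=rewrite | github.com/TinoH001/Lab | PythonTutorTest.py | ignorar_basura
-- ===== SOURCE A (Python) =====
-- permitido = {"*": "01*","&": "01234567&","#": "0123456789#","!": "0123456789ABCDEF!"}
--
-- def ignorar_basura(numero): #Ignorar los no prefijos y no permitidos
--     version_2 = []
--     seguro = None #AL PRINCIPIO NO ES NADA, SIRVE PARA DEJAR DE AÑADIR
--     temporal = ""
--     for i in numero:
--         if i in permitido:
--             prefijo_actual = i
--             temporal = []
--             actual = i
--             version_2.append(temporal)
--             seguro = True
--         if seguro:
--             if prefijo_actual in permitido[prefijo_actual] and i in permitido[actual]: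
--                 temporal.append(i)
--             else:
--                 seguro = False
--     return version_2
-- ===== SOURCE B (Python) =====
-- # Regex maximal-munch: each group is a prefix marker plus its longest run of allowed digits.
-- import re
--
-- _GROUP = re.compile(r'\*[01]*|&[0-7]*|#[0-9]*|![0-9A-F]*')
--
-- def ignorar_basura(numero):
--     return [list(m.group()) for m in _GROUP.finditer(numero)]
-- ===== Notes on version B (the rewrite author's own statement) =====
-- stated objective: faster
-- what changed: Replaced the stateful char-by-char scanner with its seguro flag and aliased temporal list by a single precompiled regex alternation (marker followed by its maximal digit-class run) extracted with re.finditer.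
import Mathlib
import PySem

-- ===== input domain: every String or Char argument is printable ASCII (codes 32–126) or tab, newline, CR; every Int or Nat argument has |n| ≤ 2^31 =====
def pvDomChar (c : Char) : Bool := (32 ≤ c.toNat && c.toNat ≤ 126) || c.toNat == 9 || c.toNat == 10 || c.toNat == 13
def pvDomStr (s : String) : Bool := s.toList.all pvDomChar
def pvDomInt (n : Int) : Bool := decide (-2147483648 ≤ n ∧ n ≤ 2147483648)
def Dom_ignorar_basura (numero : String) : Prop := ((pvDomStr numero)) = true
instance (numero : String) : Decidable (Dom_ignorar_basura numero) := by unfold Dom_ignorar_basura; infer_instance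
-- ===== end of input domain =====

-- B replaces A's char-by-char flag-state scanner by maximal-munch group extraction
-- (regex alternation in Python); same return value, alternative decomposition.

-- ===== PORT A =====
-- the `permitido` dict: keys, and value string (as its char list) per key
def permMarkers : List Char := ['*', '&', '#', '!']
def permVal (p : Char) : List Char :=
  if p = '*' then ['0', '1', '*']
  else if p = '&' then ['0', '1', '2', '3', '4', '5', '6', '7', '&']
  else if p = '#' then ['0', '1', '2', '3', '4', '5', '6', '7', '8', '9', '#']
  else if p = '!' then ['0', '1', '2', '3', '4', '5', '6', '7', '8', '9', 'A', 'B', 'C', 'D', 'E', 'F', '!']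
  else []

-- A's loop. Python's `temporal` aliases the last element of `version_2`; modeled by
-- keeping the finished groups `done` and the live group `cur` separately
-- (version_2 = done ++ cur.toList at all times). `pref`/`act` are unset (none) until
-- the first marker, exactly as in Python (read only under `seguro`).
def goA (cs : List Char) (done : List (List String)) (cur : Option (List String))
    (seguro : Bool) (pref act : Option Char) : List (List String) :=
  match cs with
  | [] => done ++ cur.toList
  | c :: rest =>
    let isM := permMarkers.contains c
    let done' := if isM then done ++ cur.toList else done
    let cur' := if isM then some ([] : List String) else cur
    let seguro' := if isM then true else seguro
    let pref' := if isM then some c else pref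
    let act' := if isM then some c else act
    if seguro' then
      if ((match pref' with | some pa => (permVal pa).contains pa | none => false) &&
          (match act' with | some a => (permVal a).contains c | none => false)) then
        goA rest done' (some ((cur'.getD []) ++ [String.ofList [c]])) true pref' act'
      else
        goA rest done' cur' false pref' act'
    else
      goA rest done' cur' seguro' pref' act'

def ignorar_basura (numero : String) : List (List String) :=
  goA numero.toList [] none false none none

-- ===== PORT B =====
-- the regex alternation \*[01]*|&[0-7]*|#[0-9]*|![0-9A-F]*: marker ↦ its digit class
def grupoClase (c : Char) : Option (List Char) :=
  if c = '*' then some ['0', '1']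
  else if c = '&' then some ['0', '1', '2', '3', '4', '5', '6', '7']
  else if c = '#' then some ['0', '1', '2', '3', '4', '5', '6', '7', '8', '9']
  else if c = '!' then some ['0', '1', '2', '3', '4', '5', '6', '7', '8', '9', 'A', 'B', 'C', 'D', 'E', 'F']
  else none

-- finditer: skip to the next marker, take the maximal run of its class, repeat
def goB (cs : List Char) : List (List String) :=
  match cs with
  | [] => []
  | c :: rest =>
    match grupoClase c with
    | some cls =>
      ((c :: rest.takeWhile (fun d => cls.contains d)).map (fun d => String.ofList [d]))
        :: goB (rest.dropWhile (fun d => cls.contains d))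
    | none => goB rest
termination_by cs.length
decreasing_by
  · exact Nat.lt_succ_of_le (List.length_dropWhile_le _ _)
  · simp

def ignorar_basura_alt (numero : String) : List (List String) :=
  goB numero.toList

-- ===== PRECONDITION & SPEC =====
def Spec_ignorar_basura (numero : String) (out : List (List String)) : Prop := out = ignorar_basura_alt numero
instance (numero : String) (out : List (List String)) : Decidable (Spec_ignorar_basura numero out) := by unfold Spec_ignorar_basura; infer_instance

-- ===== CLAIM (what is proved, stated in full; the proofs are below) =====
def Claim_equal_ignorar_basura : Prop := ∀ (numero : String), Dom_ignorar_basura numero → Spec_ignorar_basura numero (ignorar_basura numero)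

-- ===== LEMMAS AND PROOFS =====

-- the class of a marker, as a plain list (proof helper)
def clsOf (p : Char) : List Char := (grupoClase p).getD []

lemma marker_cases (p : Char) (hp : permMarkers.contains p = true) :
    p = '*' ∨ p = '&' ∨ p = '#' ∨ p = '!' := by
  simp [permMarkers] at hp
  tauto

lemma marker_self (p : Char) (hp : permMarkers.contains p = true) :
    (permVal p).contains p = true := by
  rcases marker_cases p hp with rfl | rfl | rfl | rfl <;> decide

lemma grupo_marker (p : Char) (hp : permMarkers.contains p = true) :
    grupoClase p = some (clsOf p) := by
  rcases marker_cases p hp with rfl | rfl | rfl | rfl <;> decide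

lemma grupo_nonmarker (c : Char) (hc : permMarkers.contains c = false) :
    grupoClase c = none := by
  simp [permMarkers] at hc
  obtain ⟨h1, h2, h3, h4⟩ := hc
  simp [grupoClase, h1, h2, h3, h4]

lemma cls_marker (p c : Char) (hp : permMarkers.contains p = true)
    (hc : permMarkers.contains c = true) : (clsOf p).contains c = false := by
  rcases marker_cases p hp with rfl | rfl | rfl | rfl <;>
    rcases marker_cases c hc with rfl | rfl | rfl | rfl <;> decide

lemma perm_eq_cls (p c : Char) (hp : permMarkers.contains p = true)
    (hc : permMarkers.contains c = false) :
    (permVal p).contains c = (clsOf p).contains c := by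
  simp [permMarkers] at hc
  obtain ⟨h1, h2, h3, h4⟩ := hc
  rcases marker_cases p hp with rfl | rfl | rfl | rfl <;>
    simp [permVal, clsOf, grupoClase, h1, h2, h3, h4]

-- joint invariant: with seguro=False A waits for the next marker (result =
-- done ++ cur ++ B(rest)); with seguro=True on marker p it collects exactly the
-- maximal class run, then behaves like B on the remainder
lemma goA_inv (cs : List Char) :
    (∀ (done : List (List String)) (cur : Option (List String)) (pref act : Option Char),
      goA cs done cur false pref act = done ++ cur.toList ++ goB cs) ∧
    (∀ (done : List (List String)) (t : List String) (p : Char),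
      permMarkers.contains p = true →
      goA cs done (some t) true (some p) (some p)
        = done ++ ((t ++ (cs.takeWhile (fun d => (clsOf p).contains d)).map
            (fun d => String.ofList [d]))
          :: goB (cs.dropWhile (fun d => (clsOf p).contains d)))) := by
  induction cs with
  | nil => constructor <;> intros <;> simp [goA, goB]
  | cons c rest ih =>
    obtain ⟨ihD, ihR⟩ := ih
    constructor
    · intro done cur pref act
      by_cases hc : permMarkers.contains c = true
      · rw [goA]
        simp only [hc, if_true, marker_self c hc, Bool.and_self]
        rw [ihR (done ++ cur.toList) _ c hc]
        simp [goB, grupo_marker c hc]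
      · rw [Bool.not_eq_true] at hc
        rw [goA]
        simp only [hc, Bool.false_eq_true, if_false]
        rw [ihD]
        simp [goB, grupo_nonmarker c hc]
    · intro done t p hp
      by_cases hc : permMarkers.contains c = true
      · have hnc : (clsOf p).contains c = false := cls_marker p c hp hc
        rw [goA]
        simp only [hc, if_true, marker_self c hc, Bool.and_self, Option.toList_some]
        rw [ihR _ _ c hc]
        rw [List.takeWhile_cons, List.dropWhile_cons]
        have hnc' : c ∉ clsOf p := by simpa using hnc
        simp [hnc', goB, grupo_marker c hc]
      · rw [Bool.not_eq_true] at hc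
        by_cases hin : (clsOf p).contains c = true
        · have hperm : (permVal p).contains c = true := by
            rw [perm_eq_cls p c hp hc]; exact hin
          rw [goA]
          simp only [hc, Bool.false_eq_true, if_false, if_true, marker_self p hp, hperm,
            Bool.and_self, Option.getD_some]
          rw [ihR _ _ p hp]
          rw [List.takeWhile_cons, List.dropWhile_cons]
          have hin' : c ∈ clsOf p := by simpa using hin
          simp [hin']
        · rw [Bool.not_eq_true] at hin
          have hperm : (permVal p).contains c = false := by
            rw [perm_eq_cls p c hp hc]; exact hin
          rw [goA]
          simp only [hc, Bool.false_eq_true, if_false, if_true, marker_self p hp, hperm,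
            Bool.and_false]
          rw [List.takeWhile_cons, List.dropWhile_cons]
          simp only [hin, Bool.false_eq_true, if_false, List.map_nil, List.append_nil]
          rw [ihD]
          simp [goB, grupo_nonmarker c hc]

-- ===== VERDICT (by name: the statement is the Claim_ definition above) =====
theorem ignorar_basura_spec : Claim_equal_ignorar_basura := by
  intro numero _
  unfold Spec_ignorar_basura ignorar_basura ignorar_basura_alt
  rw [(goA_inv _).1]
  simp
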